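-- pv_equiv track=rewrite | github.com/cltl/SPT_crowd_data_analysis | scripts/utils.py | remove_not_valied
-- ===== SOURCE A (Python) =====
-- from collections import defaultdict
--
-- def sort_by_workers(dict_list):
--     worker_dict = defaultdict(list)
--     for d in dict_list:
--         if 'workerid' in d:
--             worker_id = d['workerid'].strip()
--         elif 'participant_id' in d:
--             worker_id = d['participant_id'].strip()
--         worker_dict[worker_id].append(d)
--     return worker_dict
--
-- def remove_not_valied(dict_list_out, dict_list_sum):
--     worker_dict_out = sort_by_workers(dict_list_out)
--     status_include = ['AWAITING REVIEW', 'APPROVED']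
--     for d in dict_list_sum:
--         worker = d['participant_id']
--         status = d['status'].strip()
--         if status not in status_include and worker in worker_dict_out:
--             worker_dict_out.pop(worker)
--     # [j for sub in ini_list for j in sub]
--     dict_list_out_clean = [d for dict_list in worker_dict_out.values() for d in dict_list]
--     return dict_list_out_clean
-- ===== SOURCE B (Python) =====
-- from collections import defaultdict
--
-- def sort_by_workers(dict_list):
--     # unchanged module helper, reused as-is
--     worker_dict = defaultdict(list)
--     for d in dict_list:
--         if 'workerid' in d:
--             worker_id = d['workerid'].strip()
--         elif 'participant_id' in d:
--             worker_id = d['participant_id'].strip()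
--         worker_dict[worker_id].append(d)
--     return worker_dict
--
-- def remove_not_valied(dict_list_out, dict_list_sum):
--     status_include = ['AWAITING REVIEW', 'APPROVED']
--     bad = {d['participant_id'] for d in dict_list_sum
--            if d['status'].strip() not in status_include}
--     worker_dict_out = sort_by_workers(dict_list_out)
--     return [rec for worker, recs in worker_dict_out.items() if worker not in bad
--             for rec in recs]
-- ===== Notes on version B (the rewrite author's own statement) =====
-- stated objective: simpler
-- what changed: B precomputes a set of bad (unstripped) participant_ids in one pass over dict_list_sum and emits the result with a single filtered flatten over the grouped worker dict, instead of A's popping entries out of the worker dict while iterating the summary and flattening what is left.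
import Mathlib
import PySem

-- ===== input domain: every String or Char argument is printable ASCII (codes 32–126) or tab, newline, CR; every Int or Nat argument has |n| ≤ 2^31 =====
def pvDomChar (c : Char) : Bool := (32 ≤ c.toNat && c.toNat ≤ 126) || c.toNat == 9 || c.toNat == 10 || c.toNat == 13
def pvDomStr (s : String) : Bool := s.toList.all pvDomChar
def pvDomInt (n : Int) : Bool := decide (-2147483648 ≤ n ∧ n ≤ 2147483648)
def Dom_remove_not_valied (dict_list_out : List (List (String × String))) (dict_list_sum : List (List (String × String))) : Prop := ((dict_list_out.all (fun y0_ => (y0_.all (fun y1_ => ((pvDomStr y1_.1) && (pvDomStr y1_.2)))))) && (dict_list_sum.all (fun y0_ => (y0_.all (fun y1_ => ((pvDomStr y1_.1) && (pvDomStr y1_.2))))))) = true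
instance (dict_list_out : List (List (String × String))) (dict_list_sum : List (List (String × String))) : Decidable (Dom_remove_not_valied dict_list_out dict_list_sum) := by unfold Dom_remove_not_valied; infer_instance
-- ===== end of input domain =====

-- B precomputes the set of bad workers and filters once at flatten time, instead of A's
-- pop-from-the-worker-dict-while-iterating-the-summary; same return value on Pre_ (simpler decomposition, no speed claim).

-- ===== PORT A =====
-- Python: sort_by_workers (module helper, also reused by B).  The loop variable worker_id is
-- threaded as the second state component to mirror Python's leftover-variable semantics (a
-- record with neither key reuses the previous worker_id); Pre_ keeps the first-record
-- UnboundLocalError out.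
def sort_by_workers (dict_list : List (List (String × String))) :
    PySem.Dict String (List (List (String × String))) :=
  (dict_list.foldl (fun st d =>
      let worker_id :=
        if (PySem.Dict.mk d).contains "workerid" then
          PySem.Str.strip ((PySem.Dict.mk d).getD "workerid" "")
        else if (PySem.Dict.mk d).contains "participant_id" then
          PySem.Str.strip ((PySem.Dict.mk d).getD "participant_id" "")
        else st.2
      (st.1.modify worker_id [] (fun l => l ++ [d]), worker_id))
    (PySem.Dict.empty, "")).1

def remove_not_valied (dict_list_out : List (List (String × String))) (dict_list_sum : List (List (String × String))) : List (List (String × String)) :=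
  let worker_dict_out := sort_by_workers dict_list_out
  let status_include := ["AWAITING REVIEW", "APPROVED"]
  let worker_dict_out := dict_list_sum.foldl (fun wd d =>
      let worker := (PySem.Dict.mk d).getD "participant_id" ""
      let status := PySem.Str.strip ((PySem.Dict.mk d).getD "status" "")
      if status ∉ status_include ∧ wd.contains worker then wd.erase worker else wd)
    worker_dict_out
  worker_dict_out.values.foldl (fun acc dl => acc ++ dl) []

-- ===== PORT B =====
def remove_not_valied_alt (dict_list_out : List (List (String × String))) (dict_list_sum : List (List (String × String))) : List (List (String × String)) :=
  let status_include := ["AWAITING REVIEW", "APPROVED"]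
  let bad : PySem.Set String := PySem.Set.ofList
    ((dict_list_sum.filter (fun d =>
        !decide (PySem.Str.strip ((PySem.Dict.mk d).getD "status" "") ∈ status_include))).map
      (fun d => (PySem.Dict.mk d).getD "participant_id" ""))
  let worker_dict_out := sort_by_workers dict_list_out
  (worker_dict_out.items.filter (fun kv => !(PySem.Set.contains bad kv.1))).flatMap (fun kv => kv.2)

-- ===== PRECONDITION & SPEC =====
-- Pre_ is exactly where the Python A returns: the first output record must carry a
-- 'workerid' or 'participant_id' key (else A hits an unbound worker_id) and every summary
-- record must carry 'participant_id' and 'status' (else A raises KeyError).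
def Pre_remove_not_valied (dict_list_out : List (List (String × String))) (dict_list_sum : List (List (String × String))) : Prop :=
  (∀ r ∈ dict_list_out.take 1,
      ((PySem.Dict.mk r).contains "workerid" || (PySem.Dict.mk r).contains "participant_id") = true) ∧
  (∀ r ∈ dict_list_sum,
      (PySem.Dict.mk r).contains "participant_id" = true ∧ (PySem.Dict.mk r).contains "status" = true)
instance (dict_list_out : List (List (String × String))) (dict_list_sum : List (List (String × String))) : Decidable (Pre_remove_not_valied dict_list_out dict_list_sum) := by unfold Pre_remove_not_valied; infer_instance

def pvWitness_remove_not_valied : (List (List (String × String))) × (List (List (String × String))) :=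
  ([[("workerid", "w1"), ("q", "a")], [("participant_id", "w2")]],
   [[("participant_id", "w2"), ("status", "REJECTED")]])

def Spec_remove_not_valied (dict_list_out : List (List (String × String))) (dict_list_sum : List (List (String × String))) (out : List (List (String × String))) : Prop := out = remove_not_valied_alt dict_list_out dict_list_sum
instance (dict_list_out : List (List (String × String))) (dict_list_sum : List (List (String × String))) (out : List (List (String × String))) : Decidable (Spec_remove_not_valied dict_list_out dict_list_sum out) := by unfold Spec_remove_not_valied; infer_instance

-- ===== CLAIM (what is proved, stated in full; the proofs are below) =====
def Claim_equal_remove_not_valied : Prop := ∀ (dict_list_out : List (List (String × String))) (dict_list_sum : List (List (String × String))), Dom_remove_not_valied dict_list_out dict_list_sum → Pre_remove_not_valied dict_list_out dict_list_sum → Spec_remove_not_valied dict_list_out dict_list_sum (remove_not_valied dict_list_out dict_list_sum)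

-- ===== LEMMAS AND PROOFS =====

-- The list of bad (unstripped) participant_ids a summary list produces.
def badIds (dict_list_sum : List (List (String × String))) : List String :=
  (dict_list_sum.filter (fun d =>
      !decide (PySem.Str.strip ((PySem.Dict.mk d).getD "status" "") ∈ ["AWAITING REVIEW", "APPROVED"]))).map
    (fun d => (PySem.Dict.mk d).getD "participant_id" "")

theorem items_erase_eq (d : PySem.Dict String (List (List (String × String)))) (k : String) :
    (d.erase k).items = d.items.filter (fun p => p.1 != k) := by
  cases d; rfl

theorem filter_ne_of_not_contains (d : PySem.Dict String (List (List (String × String)))) (k : String)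
    (h : d.contains k = false) :
    d.items.filter (fun p => p.1 != k) = d.items := by
  cases d with
  | mk items =>
    apply List.filter_eq_self.mpr
    intro p hp
    have : k ∉ items.map Prod.fst := by
      intro hm
      have : (PySem.Dict.mk items).contains k = true := by
        rw [PySem.Dict.contains_iff_mem_keys]; simpa [PySem.Dict.keys] using hm
      simp [this] at h
    simp only [bne_iff_ne, ne_eq]
    intro he
    exact this (by simpa [he] using List.mem_map_of_mem (f := Prod.fst) hp)

-- A's pop loop over the summary leaves exactly the items whose key is not a bad id.
theorem pop_fold_items (l : List (List (String × String)))
    (wd : PySem.Dict String (List (List (String × String)))) :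
    (l.foldl (fun wd d =>
        if PySem.Str.strip ((PySem.Dict.mk d).getD "status" "") ∉ ["AWAITING REVIEW", "APPROVED"] ∧
            wd.contains ((PySem.Dict.mk d).getD "participant_id" "")
        then wd.erase ((PySem.Dict.mk d).getD "participant_id" "") else wd)
      wd).items
    = wd.items.filter (fun p => decide (p.1 ∉ badIds l)) := by
  induction l generalizing wd with
  | nil => simp [badIds]
  | cons d t ih =>
    simp only [List.foldl_cons]
    by_cases hs : PySem.Str.strip ((PySem.Dict.mk d).getD "status" "") ∈ ["AWAITING REVIEW", "APPROVED"]
    · have hcond : (!decide (PySem.Str.strip ((PySem.Dict.mk d).getD "status" "") ∈ ["AWAITING REVIEW", "APPROVED"])) = false := by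
        simp [hs]
      have hb : badIds (d :: t) = badIds t := by
        simp only [badIds, List.filter_cons, hcond, Bool.false_eq_true, if_false]
      rw [if_neg (by simp [hs]), ih, hb]
    · have hcond : (!decide (PySem.Str.strip ((PySem.Dict.mk d).getD "status" "") ∈ ["AWAITING REVIEW", "APPROVED"])) = true := by
        simp [hs]
      have hb : badIds (d :: t) = (PySem.Dict.mk d).getD "participant_id" "" :: badIds t := by
        simp only [badIds, List.filter_cons, hcond, if_true, List.map_cons]
      set w := (PySem.Dict.mk d).getD "participant_id" "" with hw
      have key : ∀ wd' : PySem.Dict String (List (List (String × String))),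
          (if PySem.Str.strip ((PySem.Dict.mk d).getD "status" "") ∉ ["AWAITING REVIEW", "APPROVED"] ∧
              wd'.contains w = true then wd'.erase w else wd').items
          = wd'.items.filter (fun p => p.1 != w) := by
        intro wd'
        by_cases hc : wd'.contains w = true
        · rw [if_pos ⟨hs, hc⟩, items_erase_eq]
        · have hc' : wd'.contains w = false := by simpa using hc
          rw [if_neg (by simp [hc']), filter_ne_of_not_contains _ _ hc']
      rw [ih, key wd, List.filter_filter, hb]
      apply List.filter_congr
      intro p _
      simp only [List.mem_cons]
      by_cases h1 : p.1 = w <;> by_cases h2 : p.1 ∈ badIds t <;> simp [h1, h2]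

theorem values_foldl_flatten (d : PySem.Dict String (List (List (String × String)))) :
    d.values.foldl (fun acc dl => acc ++ dl) ([] : List (List (String × String)))
      = d.items.flatMap (fun kv => kv.2) := by
  rw [PySem.List.foldl_append_eq_flatten]
  cases d with
  | mk items =>
    simp [PySem.Dict.values, List.flatMap]

-- ===== VERDICT (by name: the statement is the Claim_ definition above) =====
theorem remove_not_valied_spec : Claim_equal_remove_not_valied := by
  intro dict_list_out dict_list_sum _ _
  unfold Spec_remove_not_valied
  simp only [remove_not_valied, remove_not_valied_alt]
  rw [values_foldl_flatten, pop_fold_items]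
  congr 1
  apply List.filter_congr
  intro kv _
  have hmem : PySem.Set.contains (PySem.Set.ofList (badIds dict_list_sum)) kv.1
      = decide (kv.1 ∈ badIds dict_list_sum) := by
    have h1 : PySem.Set.contains (PySem.Set.ofList (badIds dict_list_sum)) kv.1
        = decide (kv.1 ∈ PySem.Set.ofList (badIds dict_list_sum)) := by simp
    rw [h1]
    by_cases h : kv.1 ∈ badIds dict_list_sum <;> simp [h, PySem.Set.mem_ofList]
  rw [badIds] at hmem
  rw [badIds, hmem, decide_not]
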